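-- pv_equiv track=rewrite | github.com/budynkoks/programowanie-gier | lab_06/utils.py | ghost_positions
-- ===== SOURCE A (Python) =====
-- SCREENW = 800
--
-- SCREENH = 600
--
-- def ghost_positions(x, y, size):
--     """Zwraca listę pozycji (x, y) do narysowania obiektu, uwzględniając krawędzie ekranu."""
--     positions = [(x, y)]
--
--     # Sprawdzamy oś X
--     current_positions = positions.copy()
--     for px, py in current_positions:
--         if px < size:
--             positions.append((px + SCREENW, py))
--         elif px > SCREENW - size:
--             positions.append((px - SCREENW, py))
--
--     # Sprawdzamy oś Y (dla wszystkich dotychczasowych wariantów X)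
--     current_positions = positions.copy()
--     for px, py in current_positions:
--         if py < size:
--             positions.append((px, py + SCREENH))
--         elif py > SCREENH - size:
--             positions.append((px, py - SCREENH))
--
--     return list(set(positions))
-- ===== SOURCE B (Python) =====
-- SCREENW = 800
--
-- SCREENH = 600
--
-- def ghost_positions(x, y, size):
--     """Per-axis candidates + Cartesian product instead of two accumulation passes."""
--     xs = [x]
--     if x < size:
--         xs.append(x + SCREENW)
--     elif x > SCREENW - size:
--         xs.append(x - SCREENW)
--     ys = [y]
--     if y < size:
--         ys.append(y + SCREENH)
--     elif y > SCREENH - size: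
--         ys.append(y - SCREENH)
--     return list(set((px, py) for py in ys for px in xs))
-- ===== Notes on version B (the rewrite author's own statement) =====
-- stated objective: simpler
-- what changed: Replaces A's two sequential list-growing passes over .copy() snapshots by computing one wrap candidate list per axis and returning the set of their Cartesian product.
import Mathlib
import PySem

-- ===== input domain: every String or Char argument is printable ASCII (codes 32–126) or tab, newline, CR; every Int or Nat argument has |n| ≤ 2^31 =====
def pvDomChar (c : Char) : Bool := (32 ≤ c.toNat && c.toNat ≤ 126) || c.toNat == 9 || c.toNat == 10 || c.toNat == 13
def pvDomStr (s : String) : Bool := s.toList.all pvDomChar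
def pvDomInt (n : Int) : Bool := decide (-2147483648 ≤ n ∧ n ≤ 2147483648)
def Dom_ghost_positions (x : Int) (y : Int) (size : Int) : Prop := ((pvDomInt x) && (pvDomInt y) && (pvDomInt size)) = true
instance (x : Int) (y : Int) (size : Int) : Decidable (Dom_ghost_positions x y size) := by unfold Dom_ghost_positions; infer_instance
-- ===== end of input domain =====

-- B replaces A's two sequential list-growing passes by per-axis candidate lists and their
-- Cartesian product (objective: simpler). The Python returns list(set(...)); its list order is
-- hash order and is compared as a set, so both ports return the PySem.Set of their elements.

-- ===== PORT A =====
def ghost_positions (x : Int) (y : Int) (size : Int) : List (Int × Int) :=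
  let positions : List (Int × Int) := [(x, y)]
  -- for px, py in positions.copy(): append the X-wrapped variant
  let positions := positions.foldl (fun ps (p : Int × Int) =>
      if p.1 < size then ps ++ [(p.1 + 800, p.2)]
      else if p.1 > 800 - size then ps ++ [(p.1 - 800, p.2)]
      else ps) positions
  -- for px, py in positions.copy(): append the Y-wrapped variant
  let positions := positions.foldl (fun ps (p : Int × Int) =>
      if p.2 < size then ps ++ [(p.1, p.2 + 600)]
      else if p.2 > 600 - size then ps ++ [(p.1, p.2 - 600)]
      else ps) positions
  PySem.Set.ofList positions  -- list(set(positions))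

-- ===== PORT B =====
def ghost_positions_alt (x : Int) (y : Int) (size : Int) : List (Int × Int) :=
  let xs : List Int :=
    if x < size then [x, x + 800]
    else if x > 800 - size then [x, x - 800]
    else [x]
  let ys : List Int :=
    if y < size then [y, y + 600]
    else if y > 600 - size then [y, y - 600]
    else [y]
  PySem.Set.ofList (ys.flatMap (fun py => xs.map (fun px => (px, py))))

-- ===== PRECONDITION & SPEC =====
def Spec_ghost_positions (x : Int) (y : Int) (size : Int) (out : List (Int × Int)) : Prop := out = ghost_positions_alt x y size
instance (x : Int) (y : Int) (size : Int) (out : List (Int × Int)) : Decidable (Spec_ghost_positions x y size out) := by unfold Spec_ghost_positions; infer_instance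

-- ===== CLAIM (what is proved, stated in full; the proofs are below) =====
def Claim_equal_ghost_positions : Prop := ∀ (x : Int) (y : Int) (size : Int), Dom_ghost_positions x y size → Spec_ghost_positions x y size (ghost_positions x y size)

-- ===== LEMMAS AND PROOFS =====

-- ===== VERDICT (by name: the statement is the Claim_ definition above) =====
theorem ghost_positions_spec : Claim_equal_ghost_positions := by
  intro x y size _
  unfold Spec_ghost_positions ghost_positions ghost_positions_alt
  by_cases h1 : x < size <;> by_cases h2 : (800:Int) - size < x <;>
    by_cases h3 : y < size <;> by_cases h4 : (600:Int) - size < y <;>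
    simp [h1, h2, h3, h4, List.foldl, List.flatMap]
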